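-- pv_equiv track=rewrite | github.com/artisan1218/LeetCode-Solution | solutions/find&ReplaceInStr/find&ReplaceInStr.py | findReplaceStringPieceTable
-- ===== SOURCE A (Python) =====
-- from typing import List
--
-- def findReplaceStringPieceTable(s: str, indices: List[int], sources: List[str], targets: List[str]) -> str:
--     table = dict()
--     for i in range(len(indices)):
--         if s[indices[i]:].startswith(sources[i]):
--             table[indices[i]] = i
--
--     result = list()
--     i = 0
--     while i<len(s):
--         if i in table:
--             result.append(targets[table[i]])
--             i += len(sources[table[i]])
--         else:
--             result.append(s[i])
--             i += 1
--     return ''.join(result)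
-- ===== SOURCE B (Python) =====
-- def findReplaceStringPieceTable(s, indices, sources, targets):
--     # last-write-wins map from match position to the operation that matches there
--     best = {}
--     for op in range(len(indices)):
--         if s[indices[op]:].startswith(sources[op]):
--             best[indices[op]] = op
--     # stitch together untouched segments and replacements, left to right over
--     # the sorted match positions; positions swallowed by an earlier
--     # replacement (idx < pos) are skipped
--     parts = []
--     pos = 0
--     for idx in sorted(best):
--         if idx < pos:
--             continue
--         op = best[idx]
--         parts.append(s[pos:idx])
--         parts.append(targets[op])
--         pos = idx + len(sources[op])
--     parts.append(s[pos:])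
--     return ''.join(parts)
-- ===== Notes on version B (the rewrite author's own statement) =====
-- stated objective: alternative
-- what changed: B replaces A's character-by-character while-loop cursor with a sort of the matched positions and left-to-right stitching of whole untouched slices and replacement targets (positions swallowed by an earlier replacement are skipped), so the output is assembled from O(k) segments instead of O(n) per-character appends.
-- outside the precondition, e.g. on findReplaceStringPieceTable('ab', [2], [''], ['X']): A returns 'ab', B returns 'abX'; on findReplaceStringPieceTable('ab', [0, 1], ['ab', 'b'], ['X']): A returns 'X', B returns 'X'
import Mathlib
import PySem

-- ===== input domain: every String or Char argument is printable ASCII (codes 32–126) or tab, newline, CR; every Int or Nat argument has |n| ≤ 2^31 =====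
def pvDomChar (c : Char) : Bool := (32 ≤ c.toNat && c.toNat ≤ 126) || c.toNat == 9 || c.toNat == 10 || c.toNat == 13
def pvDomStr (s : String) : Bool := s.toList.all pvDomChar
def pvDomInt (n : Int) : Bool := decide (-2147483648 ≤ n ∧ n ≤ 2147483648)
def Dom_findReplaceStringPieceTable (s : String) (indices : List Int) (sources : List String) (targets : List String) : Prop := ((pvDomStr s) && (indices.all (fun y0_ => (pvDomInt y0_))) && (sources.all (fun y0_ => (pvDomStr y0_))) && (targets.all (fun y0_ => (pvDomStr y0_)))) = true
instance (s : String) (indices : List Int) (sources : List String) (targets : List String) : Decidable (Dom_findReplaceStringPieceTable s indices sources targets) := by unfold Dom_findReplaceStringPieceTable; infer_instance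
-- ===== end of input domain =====

-- B replaces A's character-by-character cursor scan with sorted match positions stitched
-- together from whole slices and targets (an alternative algorithm; no speed claim).

-- ===== PORT A =====
-- both Pythons build the same last-write-wins table with the same loop:
-- for i in range(len(indices)): if s[indices[i]:].startswith(sources[i]): table[indices[i]] = i
def pvTable (cs : List Char) (indices : List Int) (sources : List String) : PySem.Dict Int Int :=
  (PySem.List.pyRange 0 indices.length 1).foldl
    (fun t i =>
      if PySem.Chars.startswith (PySem.List.slice cs (some (PySem.List.pyGetD indices i 0)) none)
          (PySem.List.pyGetD sources i "").toList
      then t.insert (PySem.List.pyGetD indices i 0) i else t)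
    PySem.Dict.empty

-- the while loop of A: result pieces, cursor i, fuel = len(s) (each step moves i forward ≥ 1 under Pre_)
def pvLoopA (cs : List Char) (table : PySem.Dict Int Int) (sources targets : List String) :
    Nat → Int → List (List Char)
  | 0, _ => []
  | fuel+1, i =>
    if i < (cs.length : Int) then
      match table.get? i with
      | some op =>
          (PySem.List.pyGetD targets op "").toList ::
            pvLoopA cs table sources targets fuel
              (i + PySem.Str.len (PySem.List.pyGetD sources op ""))
      | none =>
          [PySem.List.pyGetD cs i ' '] :: pvLoopA cs table sources targets fuel (i + 1)
    else []

def findReplaceStringPieceTable (s : String) (indices : List Int) (sources : List String) (targets : List String) : String :=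
  let cs := s.toList
  let table := pvTable cs indices sources
  String.ofList (PySem.Chars.join [] (pvLoopA cs table sources targets cs.length 0))

-- ===== PORT B =====
-- B's stitching loop: for idx in sorted(best): skip idx < pos, else append s[pos:idx], targets[op]
def pvApplyB (cs : List Char) (best : PySem.Dict Int Int) (sources targets : List String) :
    List Int → Int → List (List Char)
  | [], pos => [PySem.List.slice cs (some pos) none]
  | idx :: rest, pos =>
    if idx < pos then pvApplyB cs best sources targets rest pos
    else
      PySem.List.slice cs (some pos) (some idx) ::
        (PySem.List.pyGetD targets (best.getD idx 0) "").toList ::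
          pvApplyB cs best sources targets rest
            (idx + PySem.Str.len (PySem.List.pyGetD sources (best.getD idx 0) ""))

def findReplaceStringPieceTable_alt (s : String) (indices : List Int) (sources : List String) (targets : List String) : String :=
  let cs := s.toList
  let best := pvTable cs indices sources
  String.ofList (PySem.Chars.join []
    (pvApplyB cs best sources targets (PySem.List.sorted best.keys (fun k => k) false) 0))

-- ===== PRECONDITION & SPEC =====
-- Pre_ excludes inputs where A raises IndexError (more indices than sources, or a matching
-- operation whose index into targets is out of range) or loops forever / silently ignores a
-- match (an empty source at a nonnegative position), on which A's value — when it returns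
-- one at all — is an accident of its forward cursor that B's slicing has no reason to copy.
def Pre_findReplaceStringPieceTable (s : String) (indices : List Int) (sources : List String) (targets : List String) : Prop :=
  indices.length ≤ sources.length ∧
  ∀ i : Nat, i < indices.length →
    (PySem.List.pyGetD sources (i : Int) "" = "" → PySem.List.pyGetD indices (i : Int) 0 < 0) ∧
    (PySem.Chars.startswith
        (PySem.List.slice s.toList (some (PySem.List.pyGetD indices (i : Int) 0)) none)
        (PySem.List.pyGetD sources (i : Int) "").toList = true → i < targets.length)
instance (s : String) (indices : List Int) (sources : List String) (targets : List String) : Decidable (Pre_findReplaceStringPieceTable s indices sources targets) := by unfold Pre_findReplaceStringPieceTable; infer_instance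

def pvWitness_findReplaceStringPieceTable : String × List Int × List String × List String :=
  ("abcd", [0, 2], ["ab", "cd"], ["X", "YZ"])

def Spec_findReplaceStringPieceTable (s : String) (indices : List Int) (sources : List String) (targets : List String) (out : String) : Prop := out = findReplaceStringPieceTable_alt s indices sources targets
instance (s : String) (indices : List Int) (sources : List String) (targets : List String) (out : String) : Decidable (Spec_findReplaceStringPieceTable s indices sources targets out) := by unfold Spec_findReplaceStringPieceTable; infer_instance

-- ===== CLAIM (what is proved, stated in full; the proofs are below) =====
def Claim_equal_findReplaceStringPieceTable : Prop := ∀ (s : String) (indices : List Int) (sources : List String) (targets : List String), Dom_findReplaceStringPieceTable s indices sources targets → Pre_findReplaceStringPieceTable s indices sources targets → Spec_findReplaceStringPieceTable s indices sources targets (findReplaceStringPieceTable s indices sources targets)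

-- ===== LEMMAS AND PROOFS =====

lemma pv_join_eq_flatten (ps : List (List Char)) : PySem.Chars.join [] ps = ps.flatten := by
  show [].intercalate ps = ps.flatten
  induction ps with
  | nil => rfl
  | cons p ps ih => cases ps <;> simp_all [List.intercalate]

-- what every entry of the table satisfies
def pvGood (cs : List Char) (indices : List Int) (sources : List String) (k op : Int) : Prop :=
  0 ≤ op ∧ op < (indices.length : Int) ∧ PySem.List.pyGetD indices op 0 = k ∧
    PySem.Chars.startswith (PySem.List.slice cs (some k) none)
      (PySem.List.pyGetD sources op "").toList = true

lemma pvTable_good (cs : List Char) (indices : List Int) (sources : List String) :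
    ∀ k op, (pvTable cs indices sources).get? k = some op → pvGood cs indices sources k op := by
  unfold pvTable
  have H : ∀ (l : List Int) (t : PySem.Dict Int Int),
      (∀ i ∈ l, 0 ≤ i ∧ i < (indices.length : Int)) →
      (∀ k op, t.get? k = some op → pvGood cs indices sources k op) →
      ∀ k op, (l.foldl
        (fun t i =>
          if PySem.Chars.startswith (PySem.List.slice cs (some (PySem.List.pyGetD indices i 0)) none)
              (PySem.List.pyGetD sources i "").toList
          then t.insert (PySem.List.pyGetD indices i 0) i else t) t).get? k = some op →
        pvGood cs indices sources k op := by
    intro l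
    induction l with
    | nil => intro t _ ht; simpa using ht
    | cons j l ih =>
      intro t hl ht
      simp only [List.foldl_cons]
      apply ih _ (fun i hi => hl i (List.mem_cons_of_mem _ hi))
      intro k op hget
      by_cases hc : PySem.Chars.startswith (PySem.List.slice cs (some (PySem.List.pyGetD indices j 0)) none)
          (PySem.List.pyGetD sources j "").toList = true
      · rw [if_pos hc, PySem.Dict.get?_insert] at hget
        split_ifs at hget with hk
        · obtain ⟨h1, h2⟩ := hl j (List.mem_cons_self)
          cases hget
          exact ⟨h1, h2, hk ▸ rfl, hk ▸ hc⟩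
        · exact ht k op hget
      · rw [if_neg hc] at hget
        exact ht k op hget
  intro k op h
  refine H _ _ (fun i hi => ?_) (fun k op h => by simp [PySem.Dict.get?_empty] at h) k op h
  exact (PySem.List.mem_pyRange_one.mp hi)

lemma pvTable_nodup (cs : List Char) (indices : List Int) (sources : List String) :
    (pvTable cs indices sources).keys.Nodup := by
  unfold pvTable
  have H : ∀ (l : List Int) (t : PySem.Dict Int Int), t.keys.Nodup →
      (l.foldl
        (fun t i =>
          if PySem.Chars.startswith (PySem.List.slice cs (some (PySem.List.pyGetD indices i 0)) none)
              (PySem.List.pyGetD sources i "").toList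
          then t.insert (PySem.List.pyGetD indices i 0) i else t) t).keys.Nodup := by
    intro l
    induction l with
    | nil => intro t ht; simpa using ht
    | cons j l ih =>
      intro t ht
      simp only [List.foldl_cons]
      apply ih
      split_ifs with hc
      · exact PySem.Dict.nodup_keys_insert _ _ _ ht
      · exact ht
  exact H _ _ PySem.Dict.nodup_keys_empty

-- under Pre_, a matched nonnegative key consumes at least one char and stays inside the string
lemma pvGood_bounds (cs : List Char) (indices : List Int) (sources : List String)
    (hemp : ∀ i : Nat, i < indices.length →
      PySem.List.pyGetD sources (i : Int) "" = "" → PySem.List.pyGetD indices (i : Int) 0 < 0)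
    {k op : Int} (hg : pvGood cs indices sources k op) (hk : 0 ≤ k) :
    1 ≤ ((PySem.List.pyGetD sources op "").toList.length : Int) ∧
      k + ((PySem.List.pyGetD sources op "").toList.length : Int) ≤ (cs.length : Int) := by
  obtain ⟨h0, h1, hkey, hsw⟩ := hg
  have hne : PySem.List.pyGetD sources op "" ≠ "" := by
    intro h
    have hco : ((op.toNat : Nat) : Int) = op := by omega
    have := hemp op.toNat (by omega) (by rw [hco]; exact h)
    rw [hco, hkey] at this
    omega
  have hnil : (PySem.List.pyGetD sources op "").toList ≠ [] := by
    intro h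
    apply hne
    have : (PySem.List.pyGetD sources op "").toList = ("" : String).toList := by simp [h]
    exact String.toList_injective this
  have hpre : (PySem.List.pyGetD sources op "").toList <+: PySem.List.slice cs (some k) none :=
    (PySem.Chars.startswith_iff _ _).mp hsw
  have hlen2 := hpre.length_le
  rw [PySem.List.slice_from cs hk, List.length_drop] at hlen2
  have hpos : 1 ≤ (PySem.List.pyGetD sources op "").toList.length := by
    cases h : (PySem.List.pyGetD sources op "").toList <;> simp_all
  omega

lemma pvApplyB_skip_all (cs : List Char) (T : PySem.Dict Int Int) (sources targets : List String)
    (l : List Int) (i : Int) (h : ∀ k ∈ l, k < i) :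
    pvApplyB cs T sources targets l i = [PySem.List.slice cs (some i) none] := by
  induction l with
  | nil => rfl
  | cons k l ih =>
    rw [pvApplyB, if_pos (h k List.mem_cons_self)]
    exact ih (fun k hk => h k (List.mem_cons_of_mem _ hk))

lemma pv_drop_cons (cs : List Char) (i : Int) (h0 : 0 ≤ i) (hlt : i < (cs.length : Int)) :
    cs.drop i.toNat = PySem.List.pyGetD cs i ' ' :: cs.drop ((i + 1).toNat) := by
  have h1 : i.toNat < cs.length := by omega
  have h2 : (i + 1).toNat = i.toNat + 1 := by omega
  rw [h2, List.drop_eq_getElem_cons h1, PySem.List.pyGetD_eq_getElem cs ' ' h0 hlt]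

lemma pv_slice_from_cons (cs : List Char) (i : Int) (h0 : 0 ≤ i) (hlt : i < (cs.length : Int)) :
    PySem.List.slice cs (some i) none =
      PySem.List.pyGetD cs i ' ' :: PySem.List.slice cs (some (i + 1)) none := by
  rw [PySem.List.slice_from cs h0, PySem.List.slice_from cs (by omega : (0:Int) ≤ i + 1)]
  exact pv_drop_cons cs i h0 hlt

lemma pv_slice_cons (cs : List Char) (i k : Int) (h0 : 0 ≤ i) (hlt : i < (cs.length : Int))
    (hik : i < k) :
    PySem.List.slice cs (some i) (some k) =
      PySem.List.pyGetD cs i ' ' :: PySem.List.slice cs (some (i + 1)) (some k) := by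
  rw [PySem.List.slice_toNat cs h0 (by omega : (0:Int) ≤ k),
      PySem.List.slice_toNat cs (by omega : (0:Int) ≤ i + 1) (by omega : (0:Int) ≤ k)]
  rw [pv_drop_cons cs i h0 hlt]
  have h3 : k.toNat - i.toNat = (k.toNat - (i + 1).toNat) + 1 := by omega
  rw [h3, List.take_succ_cons]

lemma pvApplyB_step_nokey (cs : List Char) (T : PySem.Dict Int Int) (sources targets : List String)
    (l : List Int) (i : Int) (h0 : 0 ≤ i) (hlt : i < (cs.length : Int)) (hni : i ∉ l) :
    (pvApplyB cs T sources targets l i).flatten =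
      PySem.List.pyGetD cs i ' ' :: (pvApplyB cs T sources targets l (i + 1)).flatten := by
  induction l with
  | nil =>
    simp only [pvApplyB, List.flatten_cons, List.flatten_nil, List.append_nil]
    rw [pv_slice_from_cons cs i h0 hlt]
  | cons k l ih =>
    by_cases hk : k < i
    · rw [pvApplyB, if_pos hk, pvApplyB, if_pos (by omega : k < i + 1)]
      exact ih (fun h => hni (List.mem_cons_of_mem _ h))
    · have hik : i < k := by
        rcases lt_or_eq_of_le (not_lt.mp hk) with h | h
        · exact h
        · exact absurd (h ▸ List.mem_cons_self) hni
      rw [pvApplyB, if_neg hk, pvApplyB, if_neg (by omega : ¬ k < i + 1)]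
      simp only [List.flatten_cons]
      rw [pv_slice_cons cs i k h0 hlt hik]
      simp

lemma pvApplyB_step_key (cs : List Char) (T : PySem.Dict Int Int) (sources targets : List String)
    (l : List Int) (i : Int) (h0 : 0 ≤ i) (hp : l.Pairwise (· < ·)) (hmem : i ∈ l) :
    (pvApplyB cs T sources targets l i).flatten =
      (PySem.List.pyGetD targets (T.getD i 0) "").toList ++
        (pvApplyB cs T sources targets (l.filter (fun k => decide (i < k)))
          (i + PySem.Str.len (PySem.List.pyGetD sources (T.getD i 0) ""))).flatten := by
  induction l with
  | nil => cases hmem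
  | cons k l ih =>
    by_cases hk : k < i
    · have hmem' : i ∈ l := by
        rcases List.mem_cons.mp hmem with h | h
        · omega
        · exact h
      rw [pvApplyB, if_pos hk, List.filter_cons_of_neg (by simp; omega)]
      exact ih hp.of_cons hmem'
    · have hki : k = i := by
        rcases List.mem_cons.mp hmem with h | h
        · omega
        · exact absurd (List.rel_of_pairwise_cons hp h) hk
      subst hki
      rw [pvApplyB, if_neg hk, List.filter_cons_of_neg (by simp)]
      have hfl : l.filter (fun x => decide (k < x)) = l :=
        List.filter_eq_self.mpr (fun x hx => by
          simpa using List.rel_of_pairwise_cons hp hx)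
      rw [hfl]
      simp only [List.flatten_cons]
      have hz : PySem.List.slice cs (some k) (some k) = [] := by
        rw [PySem.List.slice_toNat cs (by omega : (0:Int) ≤ k) (by omega : (0:Int) ≤ k)]
        simp
      rw [hz]
      simp

lemma pvApplyB_past_end (cs : List Char) (T : PySem.Dict Int Int)
    (indices : List Int) (sources targets : List String)
    (hgood : ∀ k op, T.get? k = some op → pvGood cs indices sources k op)
    (hemp : ∀ i : Nat, i < indices.length →
      PySem.List.pyGetD sources (i : Int) "" = "" → PySem.List.pyGetD indices (i : Int) 0 < 0)
    (l : List Int) (i : Int) (hge : (cs.length : Int) ≤ i)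
    (hl : ∀ k ∈ l, (T.get? k).isSome) :
    (pvApplyB cs T sources targets l i).flatten = [] := by
  have hall : ∀ k ∈ l, k < i := by
    intro k hk
    obtain ⟨op, hop⟩ := Option.isSome_iff_exists.mp (hl k hk)
    by_cases h0 : 0 ≤ k
    · have := (pvGood_bounds cs indices sources hemp (hgood k op hop) h0).1
      have := (pvGood_bounds cs indices sources hemp (hgood k op hop) h0).2
      omega
    · omega
  rw [pvApplyB_skip_all cs T sources targets l i hall]
  have h0i : (0:Int) ≤ i := by
    have := cs.length.cast_nonneg (α := Int)
    omega
  rw [PySem.List.slice_from cs h0i]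
  simp only [List.flatten_cons, List.flatten_nil, List.append_nil]
  exact List.drop_eq_nil_of_le (by omega)

lemma pvMain (cs : List Char) (indices : List Int) (sources targets : List String)
    (T : PySem.Dict Int Int)
    (hgood : ∀ k op, T.get? k = some op → pvGood cs indices sources k op)
    (hemp : ∀ i : Nat, i < indices.length →
      PySem.List.pyGetD sources (i : Int) "" = "" → PySem.List.pyGetD indices (i : Int) 0 < 0) :
    ∀ (fuel : Nat) (i : Int) (l : List Int), 0 ≤ i → (cs.length : Int) - i ≤ (fuel : Int) →
      l.Pairwise (· < ·) → (∀ k ∈ l, (T.get? k).isSome) →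
      (∀ k, (T.get? k).isSome → i ≤ k → k ∈ l) →
      (pvLoopA cs T sources targets fuel i).flatten =
        (pvApplyB cs T sources targets l i).flatten := by
  intro fuel
  induction fuel with
  | zero =>
    intro i l h0 hfuel hp hl hup
    rw [pvLoopA]
    exact (pvApplyB_past_end cs T indices sources targets hgood hemp l i (by push_cast at hfuel ⊢; omega) hl).symm
  | succ fuel ih =>
    intro i l h0 hfuel hp hl hup
    by_cases hlt : i < (cs.length : Int)
    · rw [pvLoopA, if_pos hlt]
      cases hTi : T.get? i with
      | none =>
        have hni : i ∉ l := by
          intro h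
          have := hl i h
          rw [hTi] at this
          simp at this
        simp only [List.flatten_cons]
        rw [pvApplyB_step_nokey cs T sources targets l i h0 hlt hni]
        have := ih (i + 1) l (by omega) (by push_cast at hfuel ⊢; omega) hp hl
          (fun k hk hik => hup k hk (by omega))
        rw [this]
        simp
      | some op =>
        have hgb := pvGood_bounds cs indices sources hemp (hgood i op hTi) h0
        have hmem : i ∈ l := hup i (by rw [hTi]; rfl) le_rfl
        have hgetD : T.getD i 0 = op := by
          rw [PySem.Dict.getD_eq_get?_getD, hTi]; rfl
        simp only [List.flatten_cons]
        rw [pvApplyB_step_key cs T sources targets l i h0 hp hmem, hgetD]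
        have hslen : PySem.Str.len (PySem.List.pyGetD sources op "") =
            ((PySem.List.pyGetD sources op "").toList.length : Int) := PySem.Str.len_eq _
        have := ih (i + PySem.Str.len (PySem.List.pyGetD sources op ""))
          (l.filter (fun k => decide (i < k)))
          (by omega)
          (by push_cast at hfuel ⊢; omega)
          (List.Pairwise.sublist List.filter_sublist hp)
          (fun k hk => hl k (List.mem_of_mem_filter hk))
          (fun k hk hik => by
            refine List.mem_filter.mpr ⟨hup k hk (by omega), by simp; omega⟩)
        rw [this]
    · rw [pvLoopA, if_neg hlt]
      exact (pvApplyB_past_end cs T indices sources targets hgood hemp l i (by omega) hl).symm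

lemma pv_sorted_keys_pairwise (T : PySem.Dict Int Int) (hnd : T.keys.Nodup) :
    (PySem.List.sorted T.keys (fun k => k) false).Pairwise (· < ·) := by
  have h1 : (PySem.List.sorted T.keys (fun k => k) false).Pairwise (· ≤ ·) :=
    PySem.List.sorted_pairwise T.keys (fun k => k)
  have h2 : (PySem.List.sorted T.keys (fun k => k) false).Nodup :=
    ((PySem.List.sorted_perm T.keys (fun k => k) false).nodup_iff).mpr hnd
  exact (h1.and h2).imp (fun h => lt_of_le_of_ne h.1 h.2)

lemma pv_mem_keys_isSome {T : PySem.Dict Int Int} {k : Int} :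
    k ∈ T.keys ↔ (T.get? k).isSome := by
  rw [← PySem.Dict.contains_iff_mem_keys]
  constructor
  · intro h
    cases hg : T.get? k with
    | none => rw [(PySem.Dict.get?_eq_none_iff_contains T k).mp hg] at h; cases h
    | some v => rfl
  · intro h
    by_contra hc
    have : T.contains k = false := by
      cases hcc : T.contains k
      · rfl
      · exact absurd hcc hc
    rw [(PySem.Dict.get?_eq_none_iff_contains T k).mpr this] at h
    cases h

-- ===== VERDICT (by name: the statement is the Claim_ definition above) =====
theorem findReplaceStringPieceTable_spec : Claim_equal_findReplaceStringPieceTable := by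
  intro s indices sources targets _hdom hpre
  obtain ⟨h1, h2⟩ := hpre
  have h3x : ∀ i : Nat, i < indices.length →
      PySem.List.pyGetD sources (i : Int) "" = "" → PySem.List.pyGetD indices (i : Int) 0 < 0 :=
    fun i hi => (h2 i hi).1
  unfold Spec_findReplaceStringPieceTable findReplaceStringPieceTable findReplaceStringPieceTable_alt
  set cs := s.toList with hcs
  set T := pvTable cs indices sources with hT
  have hgood := pvTable_good cs indices sources
  have hnd := pvTable_nodup cs indices sources
  have hmain := pvMain cs indices sources targets T hgood h3x cs.length 0
    (PySem.List.sorted T.keys (fun k => k) false)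
    le_rfl (by omega)
    (pv_sorted_keys_pairwise T hnd)
    (fun k hk => pv_mem_keys_isSome.mp ((PySem.List.mem_sorted T.keys (fun k => k) false k).mp hk))
    (fun k hk _ => (PySem.List.mem_sorted T.keys (fun k => k) false k).mpr (pv_mem_keys_isSome.mpr hk))
  simp only [pv_join_eq_flatten]
  rw [hmain]
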